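-- pv_equiv track=rewrite | github.com/TheBear1616/LeetCode | 2838-maximum-coins-heroes-can-collect/2838-maximum-coins-heroes-can-collect.py | maximumCoins
-- ===== SOURCE A (Python) =====
-- from typing import List
--
-- def maximumCoins(heroes: List[int], monsters: List[int], coins: List[int]) -> List[int]:
--     orderedHeroes = list(enumerate(heroes))
--     orderedHeroes.sort(key=lambda x: x[1])
--     monsterCoins = sorted(zip(monsters, coins), key=lambda x: x[0])
--     result = [0] * len(heroes)
--
--     heroIdx = 0
--     coinSum = 0
--
--     for monster, coin in monsterCoins:
--         while heroIdx < len(orderedHeroes) and orderedHeroes[heroIdx][1] < monster: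
--             result[orderedHeroes[heroIdx][0]] = coinSum
--             heroIdx += 1
--         coinSum += coin
--
--     while heroIdx < len(orderedHeroes):
--         result[orderedHeroes[heroIdx][0]] = coinSum
--         heroIdx += 1
--
--     return result
-- ===== SOURCE B (Python) =====
-- def _bisect_right(a, x):
--     # hand-written since A imports no stdlib modules; identical to bisect.bisect_right
--     lo, hi = 0, len(a)
--     while lo < hi:
--         mid = (lo + hi) // 2
--         if x < a[mid]:
--             hi = mid
--         else:
--             lo = mid + 1
--     return lo
--
-- def maximumCoins(heroes, monsters, coins):
--     pairs = sorted(zip(monsters, coins), key=lambda p: p[0])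
--     strengths = [p[0] for p in pairs]
--     prefix = [0]
--     total = 0
--     for _, c in pairs:
--         total += c
--         prefix.append(total)
--     return [prefix[_bisect_right(strengths, h)] for h in heroes]
-- ===== Notes on version B (the rewrite author's own statement) =====
-- stated objective: idiomatic
-- what changed: A sorts the heroes with their indices and runs a two-pointer merge sweep over both sorted lists, writing results by original index; B never touches the hero order: it builds a prefix-sum array of the sorted monsters' coins once and answers each hero with one binary search.
import Mathlib
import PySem

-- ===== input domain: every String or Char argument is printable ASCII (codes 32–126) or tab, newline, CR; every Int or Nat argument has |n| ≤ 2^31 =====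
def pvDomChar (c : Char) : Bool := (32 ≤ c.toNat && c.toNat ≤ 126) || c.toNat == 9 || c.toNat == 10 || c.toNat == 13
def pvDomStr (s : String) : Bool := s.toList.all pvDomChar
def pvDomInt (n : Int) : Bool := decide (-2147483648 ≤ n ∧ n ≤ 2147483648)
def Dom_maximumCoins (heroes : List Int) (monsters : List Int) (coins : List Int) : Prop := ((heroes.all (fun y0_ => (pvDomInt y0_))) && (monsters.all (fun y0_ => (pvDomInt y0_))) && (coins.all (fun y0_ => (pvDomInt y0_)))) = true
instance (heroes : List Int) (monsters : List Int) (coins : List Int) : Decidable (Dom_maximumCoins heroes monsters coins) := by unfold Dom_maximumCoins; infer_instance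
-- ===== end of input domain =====

-- B replaces A's two-pointer sweep over the sorted hero and monster lists by a coin prefix-sum
-- table over the sorted monsters plus a binary search per hero (no hero sorting/re-indexing).

-- ===== PORT A =====
-- the inner `while heroIdx < len(orderedHeroes) and orderedHeroes[heroIdx][1] < monster` loop:
-- advancing heroIdx over orderedHeroes = consuming the remaining (index, hero) list
def pvAInner (m coinSum : Int) : List (Int × Int) → List Int → List (Int × Int) × List Int
  | [], res => ([], res)
  | (i, h) :: t, res =>
      if h < m then pvAInner m coinSum t (PySem.List.pySetD res i coinSum)
      else ((i, h) :: t, res)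

-- the `for monster, coin in monsterCoins` loop, then the trailing `while` over the leftover heroes
def pvAOuter : List (Int × Int) → List (Int × Int) → Int → List Int → List Int
  | [], rem, coinSum, res => rem.foldl (fun r p => PySem.List.pySetD r p.1 coinSum) res
  | mc :: mcs, rem, coinSum, res =>
      let s := pvAInner mc.1 coinSum rem res
      pvAOuter mcs s.1 (coinSum + mc.2) s.2

def maximumCoins (heroes : List Int) (monsters : List Int) (coins : List Int) : List Int :=
  let orderedHeroes := PySem.List.sorted (PySem.List.enumerate heroes) (fun p => p.2)
  let monsterCoins := PySem.List.sorted (monsters.zip coins) (fun p => p.1)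
  pvAOuter monsterCoins orderedHeroes 0 (List.replicate heroes.length 0)

-- ===== PORT B =====
-- Source B's hand-written `_bisect_right` is literally CPython's bisect_right lo/hi loop, i.e.
-- PySem.List.bisectRight; `prefix[k]`'s index k is always nonnegative, so pyGetD is exact there.
def maximumCoins_alt (heroes : List Int) (monsters : List Int) (coins : List Int) : List Int :=
  let pairs := PySem.List.sorted (monsters.zip coins) (fun p => p.1)
  let strengths := pairs.map (fun p => p.1)
  -- `total = 0; prefix = [0]; for _, c in pairs: total += c; prefix.append(total)`
  let pre := (pairs.foldl (fun (st : Int × List Int) pc => (st.1 + pc.2, st.2 ++ [st.1 + pc.2]))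
                ((0 : Int), ([0] : List Int))).2
  heroes.map (fun h => PySem.List.pyGetD pre ((PySem.List.bisectRight strengths h : Nat) : Int) 0)

-- ===== PRECONDITION & SPEC =====
def Spec_maximumCoins (heroes : List Int) (monsters : List Int) (coins : List Int) (out : List Int) : Prop := out = maximumCoins_alt heroes monsters coins
instance (heroes : List Int) (monsters : List Int) (coins : List Int) (out : List Int) : Decidable (Spec_maximumCoins heroes monsters coins out) := by unfold Spec_maximumCoins; infer_instance

-- ===== CLAIM (what is proved, stated in full; the proofs are below) =====
def Claim_equal_maximumCoins : Prop := ∀ (heroes : List Int) (monsters : List Int) (coins : List Int), Dom_maximumCoins heroes monsters coins → Spec_maximumCoins heroes monsters coins (maximumCoins heroes monsters coins)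

-- ===== LEMMAS AND PROOFS =====

-- total coins of the monsters (in the sorted pair list `mcs`) a hero of strength `h` defeats
def pvT (mcs : List (Int × Int)) (h : Int) : Int :=
  ((mcs.filter (fun pc => decide (pc.1 ≤ h))).map (fun pc => pc.2)).sum

-- the running prefix totals Source B's loop appends
def pvPartials (t : Int) : List (Int × Int) → List Int
  | [] => []
  | pc :: rest => (t + pc.2) :: pvPartials (t + pc.2) rest

lemma pvDropWhile_ge (m : Int) (rem : List (Int × Int))
    (hp : rem.Pairwise (fun a b => a.2 ≤ b.2)) :
    ∀ p ∈ rem.dropWhile (fun p => decide (p.2 < m)), m ≤ p.2 := by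
  intro p hp'
  have hsub := List.dropWhile_sublist (l := rem) (fun p => decide (p.2 < m))
  have hpw : (rem.dropWhile (fun p => decide (p.2 < m))).Pairwise (fun a b => a.2 ≤ b.2) :=
    hp.sublist hsub
  cases hd : rem.dropWhile (fun p => decide (p.2 < m)) with
  | nil => simp [hd] at hp'
  | cons e0 l' =>
      have hne : rem.dropWhile (fun p => decide (p.2 < m)) ≠ [] := by simp [hd]
      have h0 := List.head_dropWhile_not (fun (p : Int × Int) => decide (p.2 < m)) hne
      simp only [hd, List.head_cons, decide_eq_false_iff_not, not_lt] at h0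
      rw [hd] at hp' hpw
      rcases List.mem_cons.mp hp' with rfl | hmem
      · exact h0
      · exact le_trans h0 ((List.pairwise_cons.mp hpw).1 p hmem)

lemma pvAInner_eq (m coinSum : Int) :
    ∀ (rem : List (Int × Int)) (res : List Int),
      pvAInner m coinSum rem res =
        (rem.dropWhile (fun p => decide (p.2 < m)),
         (rem.takeWhile (fun p => decide (p.2 < m))).foldl
           (fun r p => PySem.List.pySetD r p.1 coinSum) res) := by
  intro rem
  induction rem with
  | nil => intro res; simp [pvAInner]
  | cons p t ih =>
      intro res
      obtain ⟨i, h⟩ := p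
      by_cases hlt : h < m
      · simp [pvAInner, hlt, ih]
      · simp [pvAInner, hlt]

lemma pvAOuter_eq :
    ∀ (mcs rem : List (Int × Int)) (coinSum : Int) (res : List Int),
      mcs.Pairwise (fun a b => a.1 ≤ b.1) →
      rem.Pairwise (fun a b => a.2 ≤ b.2) →
      pvAOuter mcs rem coinSum res =
        rem.foldl (fun r p => PySem.List.pySetD r p.1 (coinSum + pvT mcs p.2)) res := by
  intro mcs
  induction mcs with
  | nil =>
      intro rem coinSum res _ _
      show rem.foldl _ res = _
      refine (PySem.List.foldl_congr_mem rem _ _ res ?_).symm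
      intro acc x _
      simp [pvT]
  | cons mc mcs ih =>
      intro rem coinSum res hmc hrem
      obtain ⟨m, c⟩ := mc
      obtain ⟨hhead, htail⟩ := List.pairwise_cons.mp hmc
      show pvAOuter mcs _ _ _ = _
      rw [pvAInner_eq]
      set q : (Int × Int) → Bool := (fun p => decide (p.2 < m)) with hq
      have hdrop_pw : (rem.dropWhile q).Pairwise (fun a b => a.2 ≤ b.2) :=
        hrem.sublist (List.dropWhile_sublist q)
      rw [ih (rem.dropWhile q) (coinSum + c) _ htail hdrop_pw]
      -- RHS: split rem into takeWhile ++ dropWhile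
      conv_rhs => rw [← List.takeWhile_append_dropWhile (p := q) (l := rem), List.foldl_append]
      -- take part: pvT ((m,c)::mcs) p.2 = 0 for p with p.2 < m
      have htake : ∀ p ∈ rem.takeWhile q, pvT ((m, c) :: mcs) p.2 = 0 := by
        intro p hp
        have hplt : p.2 < m := by
          have := List.mem_takeWhile_imp hp
          simpa [hq] using this
        have : ((m, c) :: mcs).filter (fun pc => decide (pc.1 ≤ p.2)) = [] := by
          rw [List.filter_eq_nil_iff]
          intro a ha
          rcases List.mem_cons.mp ha with rfl | ha'
          · simp; omega
          · have := hhead a ha'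
            simp at this ⊢
            omega
        simp [pvT, this]
      have e1 : (rem.takeWhile q).foldl (fun r p => PySem.List.pySetD r p.1 coinSum) res
          = (rem.takeWhile q).foldl (fun r p => PySem.List.pySetD r p.1 (coinSum + pvT ((m, c) :: mcs) p.2)) res := by
        refine PySem.List.foldl_congr_mem _ _ _ res ?_
        intro acc x hx
        rw [htake x hx]; ring_nf
      rw [← e1]
      -- drop part: p.2 ≥ m so the head monster is defeated
      refine PySem.List.foldl_congr_mem _ _ _ _ ?_
      intro acc x hx
      have hge : m ≤ x.2 := pvDropWhile_ge m rem hrem x hx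
      have : pvT ((m, c) :: mcs) x.2 = c + pvT mcs x.2 := by
        simp [pvT, hge]
      rw [this]; ring_nf

lemma pvFoldlSet_untouched (g : Int → Int) :
    ∀ (l : List (Int × Int)) (res : List Int) (j : Nat),
      ((j : Int) ∉ l.map Prod.fst) →
      (∀ p ∈ l, 0 ≤ p.1) →
      (l.foldl (fun r p => PySem.List.pySetD r p.1 (g p.2)) res)[j]? = res[j]? := by
  intro l
  induction l with
  | nil => simp
  | cons p t ih =>
      intro res j hj hnn
      have hj1 : (j : Int) ≠ p.1 := by
        intro h; exact hj (by rw [List.map_cons]; exact h ▸ List.mem_cons_self)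
      have hj2 : (j : Int) ∉ t.map Prod.fst := fun h => hj (by rw [List.map_cons]; exact List.mem_cons_of_mem _ h)
      simp only [List.foldl_cons]
      rw [ih _ j hj2 (fun p hp => hnn p (List.mem_cons_of_mem _ hp))]
      rw [PySem.List.pySetD_of_nonneg _ _ (hnn p List.mem_cons_self)]
      rw [List.getElem?_set]
      have hne : p.1.toNat ≠ j := by
        intro h
        apply hj1
        have h0 := hnn p List.mem_cons_self
        omega
      simp [hne]

lemma pvFoldlSet_getElem? (heroes : List Int) (g : Int → Int) :
    ∀ (l : List (Int × Int)) (res : List Int),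
      res.length = heroes.length →
      (∀ p ∈ l, ∃ (k : Nat) (hk : k < heroes.length), p = ((k : Int), heroes[k])) →
      ((l.map Prod.fst).Nodup) →
      ∀ j : Nat,
        (l.foldl (fun r p => PySem.List.pySetD r p.1 (g p.2)) res)[j]? =
          (if ((j : Int) ∈ l.map Prod.fst) then (heroes.map g)[j]? else res[j]?) := by
  intro l
  induction l with
  | nil => simp
  | cons p t ih =>
      intro res hlen hmem hnd j
      obtain ⟨k, hk, rfl⟩ := hmem p List.mem_cons_self
      have hnn : ∀ q ∈ ((k : Int), heroes[k]) :: t, 0 ≤ q.1 := by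
        intro q hq
        obtain ⟨k', hk', rfl⟩ := hmem q hq
        positivity
      simp only [List.foldl_cons]
      rw [PySem.List.pySetD_of_nonneg _ _ (by positivity)]
      by_cases hjk : j = k
      · subst hjk
        have hjt : (j : Int) ∉ t.map Prod.fst := by
          rw [List.map_cons] at hnd
          exact (List.nodup_cons.mp hnd).1
        rw [pvFoldlSet_untouched g t _ j hjt (fun q hq => hnn q (List.mem_cons_of_mem _ hq))]
        have hjres : j < res.length := by omega
        rw [List.getElem?_set]
        simp [hjres, hk]
      · have hne : ((k : Int)).toNat ≠ j := by omega
        rw [List.map_cons] at hnd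
        obtain ⟨hh, ht⟩ := List.nodup_cons.mp hnd
        rw [ih (res.set (Int.toNat ↑k) (g heroes[k]))
            (by simpa using hlen)
            (fun q hq => hmem q (List.mem_cons_of_mem _ hq)) ht j]
        have hjne : (j : Int) ≠ (k : Int) := by omega
        by_cases hmt : (j : Int) ∈ t.map Prod.fst
        · have h1 : (j : Int) ∈ (k : Int) :: t.map Prod.fst := List.mem_cons_of_mem _ hmt
          simp only [List.map_cons, h1, hmt, if_true]
        · have h1 : (j : Int) ∉ (k : Int) :: t.map Prod.fst := by
            intro h; rcases List.mem_cons.mp h with h | h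
            · exact hjne h
            · exact hmt h
          simp only [List.map_cons, h1, hmt, if_false]
          rw [List.getElem?_set]
          simp [Ne.symm hjk]

lemma pvA_maps (heroes monsters coins : List Int) :
    maximumCoins heroes monsters coins =
      heroes.map (fun h => pvT (PySem.List.sorted (monsters.zip coins) (fun p => p.1)) h) := by
  unfold maximumCoins
  set ordered := PySem.List.sorted (PySem.List.enumerate heroes) (fun p => p.2) with hord
  set mcs := PySem.List.sorted (monsters.zip coins) (fun p => p.1) with hmcs
  have hperm : ordered.Perm (PySem.List.enumerate heroes) :=
    PySem.List.sorted_perm _ _ _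
  have hmemo : ∀ p ∈ ordered, ∃ (k : Nat) (hk : k < heroes.length), p = ((k : Int), heroes[k]) := by
    intro p hp
    have := (PySem.List.mem_enumerate_iff heroes 0 p).mp (hperm.mem_iff.mp hp)
    obtain ⟨k, hk, rfl⟩ := this
    exact ⟨k, hk, by simp⟩
  have hnd : (ordered.map Prod.fst).Nodup := by
    refine ((hperm.map Prod.fst).nodup_iff).mpr ?_
    have hpw : ((PySem.List.enumerate heroes 0).map Prod.fst).Pairwise (· < ·) :=
      List.pairwise_map.mpr (PySem.List.pairwise_lt_enumerate heroes 0)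
    exact hpw.nodup
  rw [pvAOuter_eq mcs ordered 0 _ (PySem.List.sorted_pairwise _ _)
      (PySem.List.sorted_pairwise _ _)]
  have hz : ordered.foldl (fun r p => PySem.List.pySetD r p.1 (0 + pvT mcs p.2)) (List.replicate heroes.length 0)
      = ordered.foldl (fun r p => PySem.List.pySetD r p.1 (pvT mcs p.2)) (List.replicate heroes.length 0) := by
    refine PySem.List.foldl_congr_mem _ _ _ _ ?_
    intro acc x _; rw [zero_add]
  rw [hz]
  refine List.ext_getElem? ?_
  intro j
  rw [pvFoldlSet_getElem? heroes (fun h => pvT mcs h) ordered _ (by simp) hmemo hnd j]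
  by_cases hj : j < heroes.length
  · have hmem : (j : Int) ∈ ordered.map Prod.fst := by
      have : ((j : Int), heroes[j]) ∈ PySem.List.enumerate heroes 0 := by
        rw [PySem.List.mem_enumerate_iff]
        exact ⟨j, hj, by simp⟩
      exact List.mem_map.mpr ⟨_, hperm.mem_iff.mpr this, rfl⟩
    simp [hmem]
  · have hmem : (j : Int) ∉ ordered.map Prod.fst := by
      intro h
      obtain ⟨p, hp, hfst⟩ := List.mem_map.mp h
      obtain ⟨k, hk, rfl⟩ := hmemo p hp
      simp at hfst
      omega
    simp only [hmem, if_false]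
    rw [List.getElem?_eq_none (by simpa using Nat.le_of_not_lt hj),
        List.getElem?_eq_none (by simp; omega)]

lemma pvPrefix_fold :
    ∀ (l : List (Int × Int)) (t : Int) (acc : List Int),
      (l.foldl (fun (st : Int × List Int) pc => (st.1 + pc.2, st.2 ++ [st.1 + pc.2])) (t, acc)).2 =
        acc ++ pvPartials t l := by
  intro l
  induction l with
  | nil => intro t acc; simp [pvPartials]
  | cons pc rest ih =>
      intro t acc
      simp only [List.foldl_cons, pvPartials]
      rw [ih]
      simp

lemma pvPartials_getD :
    ∀ (l : List (Int × Int)) (t : Int) (k : Nat), k ≤ l.length →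
      ((t :: pvPartials t l).getD k 0) = t + ((l.take k).map (fun pc => pc.2)).sum := by
  intro l
  induction l with
  | nil => intro t k hk; simp at hk; subst hk; simp [pvPartials]
  | cons pc rest ih =>
      intro t k hk
      cases k with
      | zero => simp
      | succ k' =>
          simp only [pvPartials, List.getD_cons_succ, List.take_succ_cons, List.map_cons, List.sum_cons]
          rw [ih (t + pc.2) k' (by simpa using hk)]
          ring

lemma pvFilter_eq_take (p : (Int × Int) → Bool) :
    ∀ (l : List (Int × Int)) (k : Nat), k ≤ l.length →
      (∀ (j : Nat) (hj : j < l.length), j < k → p l[j]) →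
      (∀ (j : Nat) (hj : j < l.length), k ≤ j → ¬ p l[j]) →
      l.filter p = l.take k := by
  intro l
  induction l with
  | nil => simp
  | cons x t ih =>
      intro k hk hyes hno
      cases k with
      | zero =>
          simp only [List.take_zero]
          rw [List.filter_eq_nil_iff]
          intro a ha
          obtain ⟨j, hj, rfl⟩ := List.mem_iff_getElem.mp ha
          exact hno j hj (Nat.zero_le j)
      | succ k' =>
          have hx : p x := hyes 0 (by simp) (Nat.succ_pos k')
          rw [List.take_succ_cons, List.filter_cons_of_pos hx]
          congr 1
          refine ih k' (by simpa using hk) ?_ ?_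
          · intro j hj hjk
            have := hyes (j+1) (by simpa using hj) (by omega)
            simpa using this
          · intro j hj hjk
            have := hno (j+1) (by simpa using hj) (by omega)
            simpa using this

lemma pvB_maps (heroes monsters coins : List Int) :
    maximumCoins_alt heroes monsters coins =
      heroes.map (fun h => pvT (PySem.List.sorted (monsters.zip coins) (fun p => p.1)) h) := by
  unfold maximumCoins_alt
  set mcs := PySem.List.sorted (monsters.zip coins) (fun p => p.1) with hmcs
  refine List.map_congr_left ?_
  intro h _
  set k := PySem.List.bisectRight (mcs.map (fun p => p.1)) h with hkdef
  have hpw : (mcs.map (fun p => p.1)).Pairwise (· ≤ ·) :=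
    PySem.List.sorted_map_key_pairwise _ _
  obtain ⟨hkle, hlo, hhi⟩ := PySem.List.bisectRight_spec (mcs.map (fun p => p.1)) h hpw
  rw [pvPrefix_fold]
  have hkle' : k ≤ mcs.length := by simpa using hkle
  have hget : (([0] ++ pvPartials 0 mcs) : List Int) = (0 : Int) :: pvPartials 0 mcs := by simp
  rw [hget, PySem.List.pyGetD_natCast, pvPartials_getD mcs 0 k hkle']
  have hfil : mcs.filter (fun pc => decide (pc.1 ≤ h)) = mcs.take k := by
    refine pvFilter_eq_take _ mcs k hkle' ?_ ?_
    · intro j hj hjk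
      have := hlo j (by simpa using hj) hjk
      simp at this ⊢
      omega
    · intro j hj hjk
      have := hhi j (by simpa using hj) hjk
      simp at this ⊢
      omega
  simp [pvT, hfil]

-- ===== VERDICT (by name: the statement is the Claim_ definition above) =====
theorem maximumCoins_spec : Claim_equal_maximumCoins := by
  intro heroes monsters coins _
  unfold Spec_maximumCoins
  rw [pvA_maps, pvB_maps]
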